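-- pv_equiv track=rewrite | github.com/m0de-60/super-duckhunt-bot | func.py | reptok
-- ===== SOURCE A (Python) =====
-- def reptok(string, x, char, tok):
--     data = string.split(char)
--     z = 0
--     newstring = ''
--     for z in range(len(data)):
--         if z == x:
--             if newstring == '':
--                 newstring = tok
--                 z += 1
--                 continue
--             if newstring != '':
--                 newstring = newstring + char + tok
--                 z += 1
--                 continue
--         if z != x:
--             if newstring == '':
--                 newstring = data[z]
--                 z += 1
--                 continue
--             if newstring != '':
--                 newstring = newstring + char + data[z]
--                 z += 1
--                 continue
--         continue
--     return newstring
-- ===== SOURCE B (Python) =====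
-- def reptok(string, x, char, tok):
--     tokens = string.split(char)
--     if 0 <= x < len(tokens):
--         tokens[x] = tok
--     return char.join(tokens)
-- ===== Notes on version B (the rewrite author's own statement) =====
-- stated objective: simpler
-- what changed: A rebuilds the result token-by-token in a loop broken up by accumulator-empty/non-empty and index==x branches; B replaces the x-th token of the split list in place and returns one char.join. Pre_ excludes char == '', where both programs raise ValueError (empty separator).
-- intended difference: When the result's first token is empty (the string starts with the separator — or x==0 with tok=='' — and the separator occurs in the string), A silently drops all leading separators because its accumulator-empty branch skips them (reptok(',a',5,',','z') returns 'a'), while B returns the faithful rejoin ',a', which preserves the string's structure as a replace-one-token function should. — e.g. on reptok(",a", 5, ",", "z"): A returns "a", B returns ",a"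
import Mathlib
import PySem

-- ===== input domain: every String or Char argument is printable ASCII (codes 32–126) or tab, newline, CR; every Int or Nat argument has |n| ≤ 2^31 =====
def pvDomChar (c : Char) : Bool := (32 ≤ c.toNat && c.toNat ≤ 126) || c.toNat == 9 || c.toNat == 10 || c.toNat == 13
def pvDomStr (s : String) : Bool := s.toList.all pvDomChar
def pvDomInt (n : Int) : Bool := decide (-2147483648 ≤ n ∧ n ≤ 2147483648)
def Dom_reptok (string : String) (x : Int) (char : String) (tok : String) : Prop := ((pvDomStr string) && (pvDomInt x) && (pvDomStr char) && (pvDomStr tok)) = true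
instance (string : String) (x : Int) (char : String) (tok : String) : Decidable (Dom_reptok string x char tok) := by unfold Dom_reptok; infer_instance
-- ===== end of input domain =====

-- B replaces the x-th split token in place and returns one char.join (simpler decomposition).
-- A drops leading empty tokens as an accident of its accumulator-empty branch; that region is
-- stated as the intended difference D_reptok below. Equality of RETURN values elsewhere is proved
-- on Pre_reptok (char ≠ "", where Python's str.split does not raise).

-- ===== PORT A =====
-- A: data = string.split(char); fold z over range(len(data)), branching on z == x and
-- on whether the accumulator is still empty. split(char) with char == "" raises (none here).
def reptok (string : String) (x : Int) (char : String) (tok : String) : String :=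
  match PySem.Chars.split? string.toList char.toList with
  | none => ""   -- unreachable under Pre_reptok (char ≠ "")
  | some data =>
    String.ofList <|
      (PySem.List.pyRange 0 (PySem.List.len data) 1).foldl
        (fun newstring z =>
          if z = x then
            (if newstring = [] then tok.toList
             else newstring ++ char.toList ++ tok.toList)
          else
            (if newstring = [] then PySem.List.pyGetD data z []
             else newstring ++ char.toList ++ PySem.List.pyGetD data z [])) []

-- ===== PORT B =====
-- B: tokens = string.split(char); if 0 <= x < len(tokens): tokens[x] = tok; return char.join(tokens)
def reptok_alt (string : String) (x : Int) (char : String) (tok : String) : String :=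
  match PySem.Chars.split? string.toList char.toList with
  | none => ""   -- unreachable under Pre_reptok (char ≠ "")
  | some tokens =>
    let tokens' :=
      if 0 ≤ x ∧ x < (tokens.length : Int)
      then PySem.List.pySetD tokens x tok.toList else tokens
    String.ofList (PySem.Chars.join char.toList tokens')

-- ===== PRECONDITION & SPEC =====
-- Pre_ excludes exactly char = "", where Python's str.split raises ValueError (empty separator) in both programs.
def Pre_reptok (string : String) (x : Int) (char : String) (tok : String) : Prop := char ≠ ""
instance (string : String) (x : Int) (char : String) (tok : String) : Decidable (Pre_reptok string x char tok) := by unfold Pre_reptok; infer_instance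

def pvWitness_reptok : String × Int × String × String := ("a,b,c", 1, ",", "z")

-- On inputs whose rejoined token list starts with an empty token — the string starts with the
-- separator (and x ≠ 0), or x = 0 with tok = '' and the separator occurring in the string —
-- A returns the string with all leading separators silently dropped (its accumulator-empty branch
-- swallows them), while B returns the faithful rejoin keeping them; B's value is the intended one
-- for 'replace the x-th token'.
def D_reptok (string : String) (x : Int) (char : String) (tok : String) : Prop :=
  char ≠ "" ∧
    (if x = 0 then tok = "" ∧ PySem.Str.isIn char string = true
     else PySem.Str.startswith string char = true)
instance (string : String) (x : Int) (char : String) (tok : String) : Decidable (D_reptok string x char tok) := by unfold D_reptok; infer_instance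

def Spec_reptok (string : String) (x : Int) (char : String) (tok : String) (out : String) : Prop := ¬ D_reptok string x char tok → out = reptok_alt string x char tok
instance (string : String) (x : Int) (char : String) (tok : String) (out : String) : Decidable (Spec_reptok string x char tok out) := by unfold Spec_reptok; infer_instance

def pvDiffWitness_reptok : String × Int × String × String := (",a", 5, ",", "z")
def pvDiffWitnessOut_reptok : String × String := ("a", ",a")

-- ===== CLAIM (what is proved, stated in full; the proofs are below) =====
def Claim_unchanged_reptok : Prop := ∀ (string : String) (x : Int) (char : String) (tok : String), Dom_reptok string x char tok → Pre_reptok string x char tok → Spec_reptok string x char tok (reptok string x char tok)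
def Claim_changed_reptok : Prop := Dom_reptok (pvDiffWitness_reptok.1) (pvDiffWitness_reptok.2.1) (pvDiffWitness_reptok.2.2.1) (pvDiffWitness_reptok.2.2.2) ∧ Pre_reptok (pvDiffWitness_reptok.1) (pvDiffWitness_reptok.2.1) (pvDiffWitness_reptok.2.2.1) (pvDiffWitness_reptok.2.2.2) ∧ D_reptok (pvDiffWitness_reptok.1) (pvDiffWitness_reptok.2.1) (pvDiffWitness_reptok.2.2.1) (pvDiffWitness_reptok.2.2.2) ∧ reptok (pvDiffWitness_reptok.1) (pvDiffWitness_reptok.2.1) (pvDiffWitness_reptok.2.2.1) (pvDiffWitness_reptok.2.2.2) = pvDiffWitnessOut_reptok.1 ∧ reptok_alt (pvDiffWitness_reptok.1) (pvDiffWitness_reptok.2.1) (pvDiffWitness_reptok.2.2.1) (pvDiffWitness_reptok.2.2.2) = pvDiffWitnessOut_reptok.2 ∧ pvDiffWitnessOut_reptok.1 ≠ pvDiffWitnessOut_reptok.2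
def Claim_exact_reptok : Prop := ∀ (string : String) (x : Int) (char : String) (tok : String), Dom_reptok string x char tok → Pre_reptok string x char tok → D_reptok string x char tok → reptok string x char tok ≠ reptok_alt string x char tok

-- ===== LEMMAS AND PROOFS =====

-- A's accumulator step on a ready-made piece list
def accStep (ch : List Char) (acc p : List Char) : List Char :=
  if acc = [] then p else acc ++ ch ++ p

-- leading empty tokens, as A's accumulator-empty branch drops them
def skipEmpty : List (List Char) → List (List Char)
  | [] => []
  | t :: ts => if t = [] then skipEmpty ts else t :: ts

theorem join_eq_flatten (ch p : List Char) (L : List (List Char)) :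
    PySem.Chars.join ch (p :: L) = p ++ (L.map (fun q => ch ++ q)).flatten := by
  induction L generalizing p with
  | nil => simp [PySem.Chars.join_singleton]
  | cons q L ih =>
      rw [PySem.Chars.join_cons_cons, ih q]
      simp

theorem foldl_accStep_ne_nil (ch : List Char) (L : List (List Char)) (acc : List Char)
    (h : acc ≠ []) :
    L.foldl (accStep ch) acc = acc ++ (L.map (fun q => ch ++ q)).flatten := by
  induction L generalizing acc with
  | nil => simp
  | cons p L ih =>
      have hne : accStep ch acc p ≠ [] := by
        simp [accStep, h]
      rw [List.foldl_cons, ih _ hne]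
      simp [accStep, h]

theorem foldl_accStep_eq_join (ch : List Char) (L : List (List Char)) :
    L.foldl (accStep ch) [] = PySem.Chars.join ch (skipEmpty L) := by
  induction L with
  | nil => simp [skipEmpty, PySem.Chars.join, List.intercalate]
  | cons p L ih =>
      by_cases hp : p = []
      · subst hp
        simpa [skipEmpty, accStep] using ih
      · rw [List.foldl_cons]
        have h1 : accStep ch [] p = p := by simp [accStep]
        rw [h1, foldl_accStep_ne_nil ch L p hp, skipEmpty, if_neg hp,
          join_eq_flatten]

-- A computes join(skipEmpty L') where L' is B's replaced token list
theorem reptok_eq_join_skipEmpty (s : String) (x : Int) (ch tk : String)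
    (hch : ch.toList ≠ []) :
    reptok s x ch tk =
      String.ofList (PySem.Chars.join ch.toList
        (skipEmpty (if 0 ≤ x ∧ x < ((PySem.Chars.splitOn s.toList ch.toList).length : Int)
          then PySem.List.pySetD (PySem.Chars.splitOn s.toList ch.toList) x tk.toList
          else PySem.Chars.splitOn s.toList ch.toList))) := by
  unfold reptok
  have hsplit : PySem.Chars.split? s.toList ch.toList
      = some (PySem.Chars.splitOn s.toList ch.toList) := by
    simp [PySem.Chars.split?, hch]
  rw [hsplit]
  dsimp only
  set data := PySem.Chars.splitOn s.toList ch.toList with hdata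
  set data' := (if 0 ≤ x ∧ x < (data.length : Int)
      then PySem.List.pySetD data x tk.toList else data) with hdata'
  have hlen : data'.length = data.length := by
    rw [hdata']; split <;> simp [PySem.List.length_pySetD]
  have hget : ∀ z : Int, 0 ≤ z → z < (data.length : Int) →
      (if z = x then tk.toList else PySem.List.pyGetD data z [])
        = PySem.List.pyGetD data' z [] := by
    intro z hz0 hzlt
    by_cases hzx : z = x
    · subst hzx
      have hin : 0 ≤ z ∧ z < (data.length : Int) := ⟨hz0, hzlt⟩
      rw [if_pos rfl, hdata', if_pos hin,
        PySem.List.pySetD_of_nonneg data tk.toList hz0,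
        PySem.List.pyGetD_eq_getElem _ _ hz0 (by simpa using hzlt),
        List.getElem_set_self]
    · rw [if_neg hzx, hdata']
      split
      · next hin =>
          rw [PySem.List.pySetD_of_nonneg data tk.toList hin.1,
            PySem.List.pyGetD_eq_getElem data _ hz0 hzlt,
            PySem.List.pyGetD_eq_getElem (data.set x.toNat tk.toList) _ hz0
              (by simpa using hzlt),
            List.getElem_set_ne (by omega)]
      · rfl
  have hbody : (PySem.List.pyRange 0 (PySem.List.len data) 1).foldl
      (fun newstring z =>
        if z = x then
          (if newstring = [] then tk.toList
           else newstring ++ ch.toList ++ tk.toList)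
        else
          (if newstring = [] then PySem.List.pyGetD data z []
           else newstring ++ ch.toList ++ PySem.List.pyGetD data z [])) []
      = (PySem.List.pyRange 0 (PySem.List.len data') 1).foldl
          (fun acc z => accStep ch.toList acc (PySem.List.pyGetD data' z [])) [] := by
    have hlen' : PySem.List.len data = PySem.List.len data' := by
      simp [PySem.List.len, hlen]
    rw [hlen']
    apply PySem.List.foldl_congr_mem
    intro acc z hz
    have hz' : 0 ≤ z ∧ z < (data'.length : Int) := by
      simpa [PySem.List.len] using (PySem.List.mem_pyRange_one.mp hz)
    have hg := hget z hz'.1 (by rw [← hlen]; exact hz'.2)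
    rw [← hg]
    by_cases hzx : z = x <;> by_cases hacc : acc = [] <;>
      simp [hzx, hacc, accStep]
  rw [hbody]
  have := PySem.List.foldl_pyRange_zero_pyGetD data' [] (accStep ch.toList) []
  rw [this, foldl_accStep_eq_join]

-- structure of splitOn.go: acc.reverse, then a piece starting with cur.reverse
theorem splitOn_go_shape (sep : List Char) (fuel : Nat) (l cur : List Char)
    (acc : List (List Char)) :
    ∃ t rest, PySem.Chars.splitOn.go sep fuel l cur acc
      = acc.reverse ++ (cur.reverse ++ t) :: rest := by
  induction fuel generalizing l cur acc with
  | zero => exact ⟨l, [], by simp [PySem.Chars.splitOn.go]⟩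
  | succ fuel ih =>
    cases l with
    | nil => exact ⟨[], [], by simp [PySem.Chars.splitOn.go]⟩
    | cons c rest =>
      by_cases hp : sep.isPrefixOf (c :: rest)
      · obtain ⟨t, r, h⟩ := ih (List.drop sep.length (c :: rest)) [] (cur.reverse :: acc)
        refine ⟨[], t :: r, ?_⟩
        rw [show PySem.Chars.splitOn.go sep (fuel+1) (c::rest) cur acc
            = PySem.Chars.splitOn.go sep fuel (List.drop sep.length (c::rest)) []
                (cur.reverse :: acc) from by simp [PySem.Chars.splitOn.go, hp], h]
        simp
      · obtain ⟨t, r, h⟩ := ih rest (c :: cur) acc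
        refine ⟨c :: t, r, ?_⟩
        rw [show PySem.Chars.splitOn.go sep (fuel+1) (c::rest) cur acc
            = PySem.Chars.splitOn.go sep fuel rest (c :: cur) acc from by
              simp [PySem.Chars.splitOn.go, hp], h]
        simp

-- splitOn.go on input not containing the separator never splits
theorem splitOn_go_no_match (sep : List Char) (fuel : Nat) (l cur : List Char)
    (acc : List (List Char)) (h : ¬ sep <:+: l) :
    PySem.Chars.splitOn.go sep fuel l cur acc = ((cur.reverse ++ l) :: acc).reverse := by
  induction fuel generalizing l cur with
  | zero => simp [PySem.Chars.splitOn.go]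
  | succ fuel ih =>
    cases l with
    | nil => simp [PySem.Chars.splitOn.go]
    | cons c rest =>
      have hp : ¬ sep.isPrefixOf (c :: rest) := by
        intro hpre
        exact h (List.IsPrefix.isInfix (List.isPrefixOf_iff_prefix.mp hpre))
      rw [show PySem.Chars.splitOn.go sep (fuel+1) (c::rest) cur acc
          = PySem.Chars.splitOn.go sep fuel rest (c :: cur) acc from by
            simp [PySem.Chars.splitOn.go, hp],
        ih rest (c :: cur) (fun hr => h (List.infix_cons_iff.mpr (Or.inr hr)))]
      simp

-- splitOn on a string not containing the separator is the singleton
theorem splitOn_of_not_infix (sep s : List Char) (h : ¬ sep <:+: s) :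
    PySem.Chars.splitOn s sep = [s] := by
  rw [PySem.Chars.splitOn, splitOn_go_no_match sep _ s [] [] h]
  simp

-- when the separator does occur, splitOn has at least two pieces
theorem splitOn_go_len_of_infix (sep : List Char) (fuel : Nat) (l cur : List Char)
    (acc : List (List Char)) (hfuel : l.length < fuel) (h : sep <:+: l) (hsep : sep ≠ []) :
    acc.length + 2 ≤ (PySem.Chars.splitOn.go sep fuel l cur acc).length := by
  induction fuel generalizing l cur acc with
  | zero => omega
  | succ fuel ih =>
    cases l with
    | nil =>
        exact absurd (List.eq_nil_of_infix_nil h) hsep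
    | cons c rest =>
      by_cases hp : sep.isPrefixOf (c :: rest)
      · rw [show PySem.Chars.splitOn.go sep (fuel+1) (c::rest) cur acc
            = PySem.Chars.splitOn.go sep fuel (List.drop sep.length (c::rest)) []
                (cur.reverse :: acc) from by simp [PySem.Chars.splitOn.go, hp]]
        obtain ⟨t, r, hshape⟩ := splitOn_go_shape sep fuel
          (List.drop sep.length (c::rest)) [] (cur.reverse :: acc)
        rw [hshape]
        simp
      · have hr : sep <:+: rest := by
          rcases List.infix_cons_iff.mp h with hpre | hinf
          · exact absurd (List.isPrefixOf_iff_prefix.mpr hpre) hp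
          · exact hinf
        rw [show PySem.Chars.splitOn.go sep (fuel+1) (c::rest) cur acc
            = PySem.Chars.splitOn.go sep fuel rest (c :: cur) acc from by
              simp [PySem.Chars.splitOn.go, hp]]
        exact ih rest (c :: cur) acc (by simpa using Nat.lt_of_succ_lt_succ hfuel) hr

theorem splitOn_len_of_infix (sep s : List Char) (h : sep <:+: s) (hsep : sep ≠ []) :
    2 ≤ (PySem.Chars.splitOn s sep).length := by
  have := splitOn_go_len_of_infix sep (s.length + 1) s [] [] (by omega) h hsep
  simpa [PySem.Chars.splitOn] using this

-- head of splitOn when the string starts with a non-separator character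
theorem splitOn_head_of_not_prefix (sep : List Char) (c : Char) (rest : List Char)
    (hp : ¬ sep.isPrefixOf (c :: rest)) :
    ∃ t r, PySem.Chars.splitOn (c :: rest) sep = (c :: t) :: r := by
  rw [PySem.Chars.splitOn,
    show PySem.Chars.splitOn.go sep ((c::rest).length + 1) (c::rest) [] []
      = PySem.Chars.splitOn.go sep (c::rest).length rest [c] [] from by
        simp [PySem.Chars.splitOn.go, hp]]
  obtain ⟨t, r, h⟩ := splitOn_go_shape sep (c::rest).length rest [c] []
  exact ⟨t, r, by simpa using h⟩

-- head of splitOn when the string starts with the separator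
theorem splitOn_head_of_prefix (sep s : List Char) (hsep : sep ≠ [])
    (hp : sep.isPrefixOf s) :
    ∃ t r, PySem.Chars.splitOn s sep = [] :: t :: r := by
  cases s with
  | nil =>
      have : sep = [] := by
        simpa using List.isPrefixOf_iff_prefix.mp hp
      exact absurd this hsep
  | cons c rest =>
    rw [PySem.Chars.splitOn,
      show PySem.Chars.splitOn.go sep ((c::rest).length + 1) (c::rest) [] []
        = PySem.Chars.splitOn.go sep (c::rest).length (List.drop sep.length (c::rest)) [] [[]]
        from by simp [PySem.Chars.splitOn.go, hp]]
    obtain ⟨t, r, h⟩ := splitOn_go_shape sep (c::rest).length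
      (List.drop sep.length (c::rest)) [] [[]]
    exact ⟨t, r, by simpa using h⟩

-- join is blind to one leading empty token only through skipEmpty
theorem join_skipEmpty_singleton (ch t : List Char) :
    PySem.Chars.join ch (skipEmpty [t]) = PySem.Chars.join ch [t] := by
  by_cases ht : t = [] <;>
    simp [skipEmpty, ht, PySem.Chars.join_singleton, PySem.Chars.join_nil]

theorem skipEmpty_of_head_ne (t : List Char) (r : List (List Char)) (h : t ≠ []) :
    skipEmpty (t :: r) = t :: r := by
  simp [skipEmpty, h]

-- join shrinks strictly under skipEmpty on a list with a leading empty token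
theorem join_length_skipEmpty_le (ch : List Char) (L : List (List Char)) :
    (PySem.Chars.join ch (skipEmpty L)).length ≤ (PySem.Chars.join ch L).length := by
  induction L with
  | nil => simp [skipEmpty]
  | cons t r ih =>
    by_cases ht : t = []
    · subst ht
      cases r with
      | nil => simp [skipEmpty, PySem.Chars.join_singleton, PySem.Chars.join_nil]
      | cons q r' =>
        rw [show skipEmpty ([] :: q :: r') = skipEmpty (q :: r') from by simp [skipEmpty],
          PySem.Chars.join_cons_cons]
        have := ih
        simp only [List.length_append, List.nil_append] at *
        omega
    · rw [skipEmpty_of_head_ne t r ht]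

theorem join_length_skipEmpty_lt (ch : List Char) (hch : ch ≠ []) (q : List Char)
    (r : List (List Char)) :
    (PySem.Chars.join ch (skipEmpty ([] :: q :: r))).length
      < (PySem.Chars.join ch ([] :: q :: r)).length := by
  rw [show skipEmpty ([] :: q :: r) = skipEmpty (q :: r) from by simp [skipEmpty],
    PySem.Chars.join_cons_cons]
  have h1 := join_length_skipEmpty_le ch (q :: r)
  have h2 : 0 < ch.length := List.length_pos_iff.mpr hch
  simp only [List.length_append, List.nil_append]
  omega

-- ===== VERDICT (by name: the statement is the Claim_ definition above) =====
theorem reptok_spec : Claim_unchanged_reptok := by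
  intro s x ch tk _ hpre
  unfold Spec_reptok
  intro hnd
  have hch : ch.toList ≠ [] := by simpa using hpre
  rw [reptok_eq_join_skipEmpty s x ch tk hch]
  unfold reptok_alt
  have hsplit : PySem.Chars.split? s.toList ch.toList
      = some (PySem.Chars.splitOn s.toList ch.toList) := by
    simp [PySem.Chars.split?, hch]
  rw [hsplit]
  dsimp only
  set L := PySem.Chars.splitOn s.toList ch.toList with hL
  set L' := (if 0 ≤ x ∧ x < (L.length : Int)
      then PySem.List.pySetD L x tk.toList else L) with hL'
  suffices hsk : PySem.Chars.join ch.toList (skipEmpty L') = PySem.Chars.join ch.toList L' by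
    rw [hsk]
  by_cases hin : ch.toList <:+: s.toList
  · by_cases hx : x = 0
    · -- x = 0 and ch occurs in s: ¬D_ forces tok ≠ ""
      have htk : tk ≠ "" := by
        intro htk0
        exact hnd ⟨hpre, by
          rw [if_pos hx]
          exact ⟨htk0, (PySem.Str.isIn_iff_infix ch s).mpr hin⟩⟩
      have htk' : tk.toList ≠ [] := by simpa using htk
      obtain ⟨t, r, hshape⟩ := splitOn_go_shape ch.toList (s.toList.length + 1) s.toList [] []
      have hLtr : L = t :: r := by
        rw [hL, PySem.Chars.splitOn, hshape]; simp
      have hin0 : 0 ≤ x ∧ x < (L.length : Int) :=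
        ⟨by omega, by rw [hLtr, hx]; exact_mod_cast Nat.succ_pos r.length⟩
      rw [hL', if_pos hin0, hx, PySem.List.pySetD_of_nonneg L tk.toList le_rfl, hLtr]
      rw [show ((t :: r).set (0:Int).toNat tk.toList) = tk.toList :: r from by simp]
      rw [skipEmpty_of_head_ne _ _ htk']
    · -- x ≠ 0 and ch occurs in s: ¬D_ forces s not to start with ch
      have hst : ¬ ch.toList.isPrefixOf s.toList := by
        intro hpfx
        exact hnd ⟨hpre, by
          simp only [if_neg hx]
          simp [PySem.Str.startswith_eq, PySem.Chars.startswith_iff,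
            List.isPrefixOf_iff_prefix.mp hpfx]⟩
      cases hs : s.toList with
      | nil =>
          exact absurd (List.eq_nil_of_infix_nil (hs ▸ hin)) hch
      | cons c rest =>
        obtain ⟨t, r, hLtr⟩ := splitOn_head_of_not_prefix ch.toList c rest (hs ▸ hst)
        have hLeq : L = (c :: t) :: r := by rw [hL, hs, hLtr]
        have hhead : ∃ r', L' = (c :: t) :: r' := by
          rw [hL', hLeq]
          split
          · next hrange =>
              obtain ⟨k, hk⟩ : ∃ k, x.toNat = k + 1 := by
                refine ⟨x.toNat - 1, ?_⟩
                omega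
              rw [PySem.List.pySetD_of_nonneg _ tk.toList hrange.1, hk]
              exact ⟨r.set k tk.toList, by simp⟩
          · exact ⟨r, rfl⟩
        obtain ⟨r', hr'⟩ := hhead
        rw [hr', skipEmpty_of_head_ne _ _ (by simp)]
  · -- ch does not occur in s: one token, join is blind to skipEmpty
    have hLs : L = [s.toList] := hL ▸ splitOn_of_not_infix ch.toList s.toList hin
    have hlen1 : L'.length = 1 := by
      rw [hL', hLs]
      split
      · next hrange =>
          rw [PySem.List.pySetD_of_nonneg _ tk.toList hrange.1]
          simp
      · simp
    obtain ⟨u, hu⟩ := List.length_eq_one_iff.mp hlen1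
    rw [hu, join_skipEmpty_singleton]

theorem reptok_changed : Claim_changed_reptok := by unfold Claim_changed_reptok; decide
theorem reptok_tight : Claim_exact_reptok := by
  intro s x ch tk _ hpre hd
  obtain ⟨hch', hcond⟩ := hd
  have hch : ch.toList ≠ [] := by simpa using hch'
  rw [reptok_eq_join_skipEmpty s x ch tk hch]
  unfold reptok_alt
  have hsplit : PySem.Chars.split? s.toList ch.toList
      = some (PySem.Chars.splitOn s.toList ch.toList) := by
    simp [PySem.Chars.split?, hch]
  rw [hsplit]
  dsimp only
  set L := PySem.Chars.splitOn s.toList ch.toList with hL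
  set L' := (if 0 ≤ x ∧ x < (L.length : Int)
      then PySem.List.pySetD L x tk.toList else L) with hL'
  suffices hshape : ∃ q r', L' = [] :: q :: r' by
    obtain ⟨q, r', h⟩ := hshape
    rw [h]
    intro heq
    have heq' := congrArg String.toList heq
    simp only [String.toList_ofList] at heq'
    exact absurd (congrArg List.length heq')
      (Nat.ne_of_lt (join_length_skipEmpty_lt ch.toList hch q r'))
  by_cases hx : x = 0
  · rw [if_pos hx] at hcond
    obtain ⟨htk, hisin⟩ := hcond
    have hin : ch.toList <:+: s.toList := (PySem.Str.isIn_iff_infix ch s).mp hisin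
    have hlen2 : 2 ≤ L.length := hL ▸ splitOn_len_of_infix ch.toList s.toList hin hch
    obtain ⟨a, b, r'', hab⟩ : ∃ a b r'', L = a :: b :: r'' := by
      match L, hlen2 with
      | a :: b :: r'', _ => exact ⟨a, b, r'', rfl⟩
    have hin0 : 0 ≤ x ∧ x < (L.length : Int) :=
      ⟨by omega, by rw [hab, hx]; exact_mod_cast Nat.succ_pos _⟩
    have htk' : tk.toList = [] := by simp [htk]
    refine ⟨b, r'', ?_⟩
    rw [hL', if_pos hin0, PySem.List.pySetD_of_nonneg L tk.toList hin0.1, hab, hx, htk']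
    simp
  · rw [if_neg hx] at hcond
    have hpfx : ch.toList.isPrefixOf s.toList := by
      rw [PySem.Str.startswith_eq] at hcond
      exact List.isPrefixOf_iff_prefix.mpr ((PySem.Chars.startswith_iff _ _).mp hcond)
    obtain ⟨t, r, hLtr⟩ := splitOn_head_of_prefix ch.toList s.toList hch hpfx
    have hLeq : L = [] :: t :: r := hL ▸ hLtr
    rw [hL', hLeq]
    split
    · next hrange =>
        obtain ⟨k, hk⟩ : ∃ k, x.toNat = k + 1 := ⟨x.toNat - 1, by omega⟩
        rw [PySem.List.pySetD_of_nonneg _ tk.toList hrange.1, hk]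
        cases k with
        | zero => exact ⟨tk.toList, r, by simp⟩
        | succ k' => exact ⟨t, r.set k' tk.toList, by simp⟩
    · exact ⟨t, r, rfl⟩
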